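-- pv_equiv track=rewrite | github.com/FlavioACampos/TSIA | _functions_.py | fuzzy_matrix_sum
-- ===== SOURCE A (Python) =====
-- def fuzzy_matrix_sum(matrix):
--     tri_sum = [0,0,0]
--     for row in matrix:
--         for triangular in row:
--             tri_sum[0] += triangular[0]
--             tri_sum[1] += triangular[1]
--             tri_sum[2] += triangular[2]
--     return tri_sum
-- ===== SOURCE B (Python) =====
-- def fuzzy_matrix_sum(matrix):
--     flat = [t for row in matrix for t in row]
--     return [sum(t[0] for t in flat),
--             sum(t[1] for t in flat),
--             sum(t[2] for t in flat)]
-- ===== Notes on version B (the rewrite author's own statement) =====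
-- stated objective: alternative
-- what changed: B flattens the matrix once, then computes each of the three components by its own independent summation over the flat list, instead of A's single fused nested-loop accumulation into a mutable 3-cell list.
import Mathlib
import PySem

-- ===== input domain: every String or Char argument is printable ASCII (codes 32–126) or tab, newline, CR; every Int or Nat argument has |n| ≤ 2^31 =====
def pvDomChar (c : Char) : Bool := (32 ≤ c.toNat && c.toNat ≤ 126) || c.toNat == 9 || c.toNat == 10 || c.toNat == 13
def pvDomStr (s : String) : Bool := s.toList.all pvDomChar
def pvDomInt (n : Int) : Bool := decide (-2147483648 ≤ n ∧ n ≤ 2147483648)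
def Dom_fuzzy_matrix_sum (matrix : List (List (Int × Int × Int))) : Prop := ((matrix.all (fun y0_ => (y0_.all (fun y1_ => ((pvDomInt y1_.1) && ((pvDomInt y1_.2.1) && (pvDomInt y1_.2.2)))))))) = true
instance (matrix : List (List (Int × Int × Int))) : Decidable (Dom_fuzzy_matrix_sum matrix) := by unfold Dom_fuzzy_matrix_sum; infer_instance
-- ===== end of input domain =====

-- B recomputes the sum as three independent per-component scans over a flattened list; alternative decomposition, same cost.
-- ===== PORT A =====
def fuzzy_matrix_sum (matrix : List (List (Int × Int × Int))) : List Int :=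
  let tri_sum : Int × Int × Int :=
    matrix.foldl (fun acc row =>
      row.foldl (fun acc triangular =>
        (acc.1 + triangular.1, acc.2.1 + triangular.2.1, acc.2.2 + triangular.2.2)) acc)
      (0, 0, 0)
  [tri_sum.1, tri_sum.2.1, tri_sum.2.2]

-- ===== PORT B =====
def fuzzy_matrix_sum_alt (matrix : List (List (Int × Int × Int))) : List Int :=
  let flat := matrix.flatMap (fun row => row)
  [(flat.map (fun t => t.1)).sum,
   (flat.map (fun t => t.2.1)).sum,
   (flat.map (fun t => t.2.2)).sum]

-- ===== PRECONDITION & SPEC =====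
def Spec_fuzzy_matrix_sum (matrix : List (List (Int × Int × Int))) (out : List Int) : Prop := out = fuzzy_matrix_sum_alt matrix
instance (matrix : List (List (Int × Int × Int))) (out : List Int) : Decidable (Spec_fuzzy_matrix_sum matrix out) := by unfold Spec_fuzzy_matrix_sum; infer_instance

-- ===== CLAIM (what is proved, stated in full; the proofs are below) =====
def Claim_equal_fuzzy_matrix_sum : Prop := ∀ (matrix : List (List (Int × Int × Int))), Dom_fuzzy_matrix_sum matrix → Spec_fuzzy_matrix_sum matrix (fuzzy_matrix_sum matrix)

-- ===== LEMMAS AND PROOFS =====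

lemma inner_foldl (row : List (Int × Int × Int)) (acc : Int × Int × Int) :
    row.foldl (fun acc triangular =>
      (acc.1 + triangular.1, acc.2.1 + triangular.2.1, acc.2.2 + triangular.2.2)) acc
    = (acc.1 + (row.map (fun t => t.1)).sum,
       acc.2.1 + (row.map (fun t => t.2.1)).sum,
       acc.2.2 + (row.map (fun t => t.2.2)).sum) := by
  induction row generalizing acc with
  | nil => simp
  | cons h t ih =>
      simp only [List.foldl_cons]
      rw [ih]
      simp [Prod.ext_iff]
      refine ⟨by ring, by ring, by ring⟩

lemma outer_foldl (matrix : List (List (Int × Int × Int))) (acc : Int × Int × Int) :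
    matrix.foldl (fun acc row =>
      row.foldl (fun acc triangular =>
        (acc.1 + triangular.1, acc.2.1 + triangular.2.1, acc.2.2 + triangular.2.2)) acc) acc
    = (acc.1 + ((matrix.flatMap (fun row => row)).map (fun t => t.1)).sum,
       acc.2.1 + ((matrix.flatMap (fun row => row)).map (fun t => t.2.1)).sum,
       acc.2.2 + ((matrix.flatMap (fun row => row)).map (fun t => t.2.2)).sum) := by
  induction matrix generalizing acc with
  | nil => simp
  | cons h t ih =>
      simp only [List.foldl_cons]
      rw [inner_foldl, ih]
      simp [Prod.ext_iff]
      refine ⟨by ring, by ring, by ring⟩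

-- ===== VERDICT (by name: the statement is the Claim_ definition above) =====
theorem fuzzy_matrix_sum_spec : Claim_equal_fuzzy_matrix_sum := by
  intro matrix _
  show _ = _
  simp [fuzzy_matrix_sum, fuzzy_matrix_sum_alt, outer_foldl]
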